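-- pv_equiv track=rewrite | github.com/medthehatta/cant-get-enough-caravans | prototyping/choice_design.py | allowed_magnitude
-- ===== SOURCE A (Python) =====
-- def allowed_magnitude(min_=None, max_=None):
--     every = ["small", "normal", "large", "huge"]
--     started = True if min_ is None else False
--     result = []
--     for e in every:
--         if e == min_:
--             started = True
--         if started:
--             result.append(e)
--         if e == max_:
--             return result
--     else:
--         return result
-- ===== SOURCE B (Python) =====
-- def allowed_magnitude(min_=None, max_=None):
--     every = ["small", "normal", "large", "huge"]
--     s = 0 if min_ is None else (every.index(min_) if min_ in every else len(every))
--     e = every.index(max_) + 1 if max_ in every else len(every)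
--     return every[s:e]
-- ===== Notes on version B (the rewrite author's own statement) =====
-- stated objective: simpler
-- what changed: Replaces the element-by-element scan with a started flag and early return by computing a start and stop index via membership/index lookups and taking one slice of the fixed list.
import Mathlib
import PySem

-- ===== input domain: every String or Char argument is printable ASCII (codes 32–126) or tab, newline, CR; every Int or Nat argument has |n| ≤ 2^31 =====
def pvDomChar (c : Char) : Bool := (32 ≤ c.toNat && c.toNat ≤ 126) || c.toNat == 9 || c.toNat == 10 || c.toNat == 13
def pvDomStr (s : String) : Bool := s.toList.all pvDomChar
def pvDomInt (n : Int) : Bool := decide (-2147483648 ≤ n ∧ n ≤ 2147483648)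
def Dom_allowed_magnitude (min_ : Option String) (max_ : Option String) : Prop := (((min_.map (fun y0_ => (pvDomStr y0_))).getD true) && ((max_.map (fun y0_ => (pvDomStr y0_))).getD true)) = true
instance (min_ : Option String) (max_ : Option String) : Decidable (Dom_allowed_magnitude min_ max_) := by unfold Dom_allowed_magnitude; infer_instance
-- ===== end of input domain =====

-- B replaces A's scan with a started flag and early return by index lookups plus one slice (objective: simpler).

-- ===== PORT A =====
-- the for-loop: `started` flag, append when started, early return when e == max_
def pvLoopA (min_ max_ : Option String) : List String → Bool → List String → List String
  | [], _, result => result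
  | e :: rest, started, result =>
    let started := if some e = min_ then true else started
    let result := if started then result ++ [e] else result
    if some e = max_ then result else pvLoopA min_ max_ rest started result

def allowed_magnitude (min_ : Option String) (max_ : Option String) : List String :=
  let every := ["small", "normal", "large", "huge"]
  let started := if min_ = none then true else false
  pvLoopA min_ max_ every started []

-- ===== PORT B =====
def allowed_magnitude_alt (min_ : Option String) (max_ : Option String) : List String :=
  let every := ["small", "normal", "large", "huge"]
  let s : Int := match min_ with
    | none => 0
    | some m => match PySem.List.index? every m with
      | some i => (i : Int)
      | none => (every.length : Int)
  let e : Int := match max_ with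
    | none => (every.length : Int)
    | some x => match PySem.List.index? every x with
      | some i => (i : Int) + 1
      | none => (every.length : Int)
  PySem.List.slice every (some s) (some e)

-- ===== PRECONDITION & SPEC =====
def Spec_allowed_magnitude (min_ : Option String) (max_ : Option String) (out : List String) : Prop := out = allowed_magnitude_alt min_ max_
instance (min_ : Option String) (max_ : Option String) (out : List String) : Decidable (Spec_allowed_magnitude min_ max_ out) := by unfold Spec_allowed_magnitude; infer_instance

-- ===== CLAIM (what is proved, stated in full; the proofs are below) =====
def Claim_equal_allowed_magnitude : Prop := ∀ (min_ : Option String) (max_ : Option String), Dom_allowed_magnitude min_ max_ → Spec_allowed_magnitude min_ max_ (allowed_magnitude min_ max_)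

-- ===== LEMMAS AND PROOFS =====
theorem idx_none (s : String) (h1 : s ≠ "small") (h2 : s ≠ "normal") (h3 : s ≠ "large") (h4 : s ≠ "huge") :
    List.idxOf? s ["small", "normal", "large", "huge"] = none := by
  have : PySem.List.index? ["small", "normal", "large", "huge"] s = none := by
    rw [PySem.List.index?_eq_none_iff]
    simp [h1, h2, h3, h4]
  rwa [PySem.List.index?_eq_idxOf?] at this

-- ===== VERDICT (by name: the statement is the Claim_ definition above) =====
theorem allowed_magnitude_spec : Claim_equal_allowed_magnitude := by
  intro min_ max_ _
  unfold Spec_allowed_magnitude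
  rcases min_ with _ | m <;> rcases max_ with _ | x
  · decide
  · -- min_ = none
    by_cases g1 : x = "small"
    · subst g1
      decide
    by_cases g2 : x = "normal"
    · subst g2
      decide
    by_cases g3 : x = "large"
    · subst g3
      decide
    by_cases g4 : x = "huge"
    · subst g4
      decide
    simp [allowed_magnitude, allowed_magnitude_alt, pvLoopA, idx_none x g1 g2 g3 g4, Ne.symm g1, Ne.symm g2, Ne.symm g3, Ne.symm g4, PySem.List.slice, PySem.List.clampIdx]
  · -- max_ = none
    by_cases h1 : m = "small"
    · subst h1; decide
    by_cases h2 : m = "normal"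
    · subst h2; decide
    by_cases h3 : m = "large"
    · subst h3; decide
    by_cases h4 : m = "huge"
    · subst h4; decide
    simp [allowed_magnitude, allowed_magnitude_alt, pvLoopA, idx_none m h1 h2 h3 h4, Ne.symm h1, Ne.symm h2, Ne.symm h3, Ne.symm h4, PySem.List.slice, PySem.List.clampIdx]
  · -- both some
    by_cases h1 : m = "small"
    · subst h1
      by_cases g1 : x = "small"
      · subst g1
        decide
      by_cases g2 : x = "normal"
      · subst g2
        decide
      by_cases g3 : x = "large"
      · subst g3
        decide
      by_cases g4 : x = "huge"
      · subst g4
        decide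
      simp [allowed_magnitude, allowed_magnitude_alt, pvLoopA, idx_none x g1 g2 g3 g4, Ne.symm g1, Ne.symm g2, Ne.symm g3, Ne.symm g4, PySem.List.slice, PySem.List.clampIdx]
      all_goals decide
    by_cases h2 : m = "normal"
    · subst h2
      by_cases g1 : x = "small"
      · subst g1
        decide
      by_cases g2 : x = "normal"
      · subst g2
        decide
      by_cases g3 : x = "large"
      · subst g3
        decide
      by_cases g4 : x = "huge"
      · subst g4
        decide
      simp [allowed_magnitude, allowed_magnitude_alt, pvLoopA, idx_none x g1 g2 g3 g4, Ne.symm g1, Ne.symm g2, Ne.symm g3, Ne.symm g4, PySem.List.slice, PySem.List.clampIdx]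
      all_goals decide
    by_cases h3 : m = "large"
    · subst h3
      by_cases g1 : x = "small"
      · subst g1
        decide
      by_cases g2 : x = "normal"
      · subst g2
        decide
      by_cases g3 : x = "large"
      · subst g3
        decide
      by_cases g4 : x = "huge"
      · subst g4
        decide
      simp [allowed_magnitude, allowed_magnitude_alt, pvLoopA, idx_none x g1 g2 g3 g4, Ne.symm g1, Ne.symm g2, Ne.symm g3, Ne.symm g4, PySem.List.slice, PySem.List.clampIdx]
      all_goals decide
    by_cases h4 : m = "huge"
    · subst h4
      by_cases g1 : x = "small"
      · subst g1
        decide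
      by_cases g2 : x = "normal"
      · subst g2
        decide
      by_cases g3 : x = "large"
      · subst g3
        decide
      by_cases g4 : x = "huge"
      · subst g4
        decide
      simp [allowed_magnitude, allowed_magnitude_alt, pvLoopA, idx_none x g1 g2 g3 g4, Ne.symm g1, Ne.symm g2, Ne.symm g3, Ne.symm g4, PySem.List.slice, PySem.List.clampIdx]
      all_goals decide
    by_cases g1 : x = "small"
    · subst g1
      simp [allowed_magnitude, allowed_magnitude_alt, pvLoopA, idx_none m h1 h2 h3 h4, Ne.symm h1, PySem.List.slice, PySem.List.clampIdx]
    by_cases g2 : x = "normal"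
    · subst g2
      simp [allowed_magnitude, allowed_magnitude_alt, pvLoopA, idx_none m h1 h2 h3 h4, Ne.symm h1, Ne.symm h2, PySem.List.slice, PySem.List.clampIdx]
    by_cases g3 : x = "large"
    · subst g3
      simp [allowed_magnitude, allowed_magnitude_alt, pvLoopA, idx_none m h1 h2 h3 h4, Ne.symm h1, Ne.symm h2, Ne.symm h3, PySem.List.slice, PySem.List.clampIdx]
    by_cases g4 : x = "huge"
    · subst g4
      simp [allowed_magnitude, allowed_magnitude_alt, pvLoopA, idx_none m h1 h2 h3 h4, Ne.symm h1, Ne.symm h2, Ne.symm h3, Ne.symm h4, PySem.List.slice, PySem.List.clampIdx]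
    simp [allowed_magnitude, allowed_magnitude_alt, pvLoopA, idx_none m h1 h2 h3 h4, idx_none x g1 g2 g3 g4, Ne.symm h1, Ne.symm h2, Ne.symm h3, Ne.symm h4, Ne.symm g1, Ne.symm g2, Ne.symm g3, Ne.symm g4, PySem.List.slice, PySem.List.clampIdx]
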